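-- pv_equiv track=rewrite | github.com/KelvinChi/LeetcodeBank | 205_isomorphic_strings.py | feedback_num
-- ===== SOURCE A (Python) =====
-- def feedback_num(word):
--     num = [0] * len(word)
--     for i in range(1, len(word)):
--         if word[i] != word[i - 1]:
--             num[i] = num[i - 1] + 1
--         else:
--             num[i] = num[i - 1]
--     return num
-- ===== SOURCE B (Python) =====
-- def feedback_num(word):
--     out = []
--     k = 0
--     i = 0
--     n = len(word)
--     while i < n:
--         j = i + 1
--         while j < n and word[j] == word[i]:
--             j += 1
--         out.extend([k] * (j - i))
--         k += 1
--         i = j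
--     return out
-- ===== Notes on version B (the rewrite author's own statement) =====
-- stated objective: alternative
-- what changed: B decomposes the word into maximal runs of equal characters and emits each run's index as a constant block, instead of A's per-position prefix update over an index-addressed array.
import Mathlib
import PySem

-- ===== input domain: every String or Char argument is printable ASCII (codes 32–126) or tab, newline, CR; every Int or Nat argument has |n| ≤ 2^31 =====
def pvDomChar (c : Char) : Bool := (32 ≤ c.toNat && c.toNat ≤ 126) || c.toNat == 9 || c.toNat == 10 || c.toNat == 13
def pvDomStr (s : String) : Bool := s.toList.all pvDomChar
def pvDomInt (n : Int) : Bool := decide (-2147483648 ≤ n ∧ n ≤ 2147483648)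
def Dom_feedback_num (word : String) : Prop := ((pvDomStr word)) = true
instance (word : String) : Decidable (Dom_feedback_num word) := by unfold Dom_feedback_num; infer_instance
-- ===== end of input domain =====

-- B replaces A's per-position prefix update over an index-addressed array by a run decomposition:
-- it scans each maximal run of equal characters and emits the run's index as a constant block.

-- ===== PORT A =====
-- num[i] / num[i-1] / word[i] / word[i-1] are accessed with indices 1 ≤ i < len(word),
-- always in range, so pyGetD with a default is exact here.
def feedback_num (word : String) : List Int :=
  let cs := word.toList
  (PySem.List.pyRange 1 (cs.length : Int) 1).foldl
    (fun num i =>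
      if PySem.List.pyGetD cs i ' ' ≠ PySem.List.pyGetD cs (i - 1) ' ' then
        num.set i.toNat (PySem.List.pyGetD num (i - 1) 0 + 1)
      else
        num.set i.toNat (PySem.List.pyGetD num (i - 1) 0))
    (List.replicate cs.length 0)

-- ===== PORT B =====
-- outer while-loop of Source B: one step per maximal run; the inner while-loop that advances j
-- over the characters equal to word[i] is the takeWhile/dropWhile split of the remaining list.
def feedback_num_alt_go (k : Int) : List Char → List Int
  | [] => []
  | c :: rest =>
      List.replicate ((rest.takeWhile (fun x => x == c)).length + 1) k
        ++ feedback_num_alt_go (k + 1) (rest.dropWhile (fun x => x == c))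
termination_by l => l.length
decreasing_by
  exact Nat.lt_succ_of_le (List.length_dropWhile_le _ _)

def feedback_num_alt (word : String) : List Int :=
  feedback_num_alt_go 0 word.toList

-- ===== PRECONDITION & SPEC =====
def Spec_feedback_num (word : String) (out : List Int) : Prop := out = feedback_num_alt word
instance (word : String) (out : List Int) : Decidable (Spec_feedback_num word out) := by unfold Spec_feedback_num; infer_instance

-- ===== CLAIM (what is proved, stated in full; the proofs are below) =====
def Claim_equal_feedback_num : Prop := ∀ (word : String), Dom_feedback_num word → Spec_feedback_num word (feedback_num word)

-- ===== LEMMAS AND PROOFS =====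

-- canonical description of the result: running change count, carrying the previous char and count
def pvChg (p : Char) (a : Int) : List Char → List Int
  | [] => []
  | c :: t => (if c ≠ p then a + 1 else a) :: pvChg c (if c ≠ p then a + 1 else a) t

def pvCanon : List Char → List Int
  | [] => []
  | c :: t => 0 :: pvChg c 0 t

theorem pvChg_length (cs : List Char) : ∀ (p : Char) (a : Int), (pvChg p a cs).length = cs.length := by
  induction cs with
  | nil => intro p a; rfl
  | cons c t ih => intro p a; simp [pvChg, ih]

theorem pvCanon_length (cs : List Char) : (pvCanon cs).length = cs.length := by
  cases cs with
  | nil => rfl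
  | cons c t => simp [pvCanon, pvChg_length]

theorem pvChg_getD_step (cs : List Char) : ∀ (p : Char) (a : Int) (i : Nat), i + 1 < cs.length →
    (pvChg p a cs).getD (i + 1) 0
      = (pvChg p a cs).getD i 0 + (if cs.getD (i + 1) ' ' ≠ cs.getD i ' ' then 1 else 0) := by
  induction cs with
  | nil => intro p a i h; simp at h
  | cons c t ih =>
    intro p a i h
    cases i with
    | zero =>
      cases t with
      | nil => simp at h
      | cons x u =>
        simp only [pvChg, List.getD_cons_succ, List.getD_cons_zero]
        by_cases hx : x ≠ c <;> by_cases hc : c ≠ p <;> simp [hx, hc]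
    | succ j =>
      simp only [pvChg, List.getD_cons_succ]
      exact ih c _ j (by simpa using h)

theorem pvCanon_getD_step (cs : List Char) (i : Nat) (h : i + 1 < cs.length) :
    (pvCanon cs).getD (i + 1) 0
      = (pvCanon cs).getD i 0 + (if cs.getD (i + 1) ' ' ≠ cs.getD i ' ' then 1 else 0) := by
  cases cs with
  | nil => simp at h
  | cons c t =>
    cases i with
    | zero =>
      cases t with
      | nil => simp at h
      | cons x u =>
        simp only [pvCanon, pvChg, List.getD_cons_succ, List.getD_cons_zero]
        by_cases hx : x ≠ c <;> simp [hx]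
    | succ j =>
      simp only [pvCanon, List.getD_cons_succ]
      exact pvChg_getD_step t c 0 j (by simpa using h)

-- the step function of port A's loop
def pvStepA (cs : List Char) (num : List Int) (i : Int) : List Int :=
  if PySem.List.pyGetD cs i ' ' ≠ PySem.List.pyGetD cs (i - 1) ' ' then
    num.set i.toNat (PySem.List.pyGetD num (i - 1) 0 + 1)
  else
    num.set i.toNat (PySem.List.pyGetD num (i - 1) 0)

-- A's loop invariant: after processing indices 1..m-1, the first m entries are the canonical
-- values and the rest are still the initial zeros.
theorem pvA_inv (cs : List Char) : ∀ (m : Nat), 1 ≤ m → m ≤ cs.length →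
    (PySem.List.pyRange 1 (m : Int) 1).foldl (pvStepA cs) (List.replicate cs.length 0)
      = (pvCanon cs).take m ++ List.replicate (cs.length - m) 0 := by
  intro m
  induction m with
  | zero => intro h; omega
  | succ m ih =>
    intro _ hm1
    by_cases hm : 1 ≤ m
    · -- m ≥ 1: split off the last loop iteration
      have hrange : PySem.List.pyRange 1 ((m + 1 : Nat) : Int) 1
          = PySem.List.pyRange 1 (m : Int) 1 ++ [(m : Int)] := by
        have := PySem.List.pyRange_one_succ_right (a := 1) (b := (m : Int)) (by exact_mod_cast hm)
        exact_mod_cast this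
      rw [hrange, List.foldl_append]
      rw [ih hm (by omega)]
      simp only [List.foldl_cons, List.foldl_nil]
      -- one step of the loop at index m
      have hmlt : m < cs.length := by omega
      have hPlen : ((pvCanon cs).take m).length = m := by
        rw [List.length_take, pvCanon_length]; omega
      have hcanlen : m < (pvCanon cs).length := by rw [pvCanon_length]; omega
      have hmm : ((m : Int) - 1) = ((m - 1 : Nat) : Int) := by omega
      -- the value read from num at m-1 is the canonical value at m-1
      have hread : PySem.List.pyGetD ((pvCanon cs).take m ++ List.replicate (cs.length - m) 0) ((m : Int) - 1) 0
          = (pvCanon cs).getD (m - 1) 0 := by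
        rw [hmm, PySem.List.pyGetD_natCast]
        rw [List.getD_eq_getElem?_getD, List.getD_eq_getElem?_getD]
        rw [List.getElem?_append_left (by rw [hPlen]; omega)]
        rw [List.getElem?_take]
        rw [if_pos (by omega)]
      -- setting index m in the state appends the new value after the prefix
      have hset : ∀ v : Int, (((pvCanon cs).take m ++ List.replicate (cs.length - m) 0).set (m : Int).toNat v)
          = (pvCanon cs).take m ++ v :: List.replicate (cs.length - (m + 1)) 0 := by
        intro v
        have hrep : List.replicate (cs.length - m) (0 : Int) = 0 :: List.replicate (cs.length - (m + 1)) 0 := by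
          have h2 : cs.length - m = (cs.length - (m + 1)) + 1 := by omega
          rw [h2, List.replicate_succ]
        rw [List.set_append, if_neg (by simp [hPlen])]
        simp [hPlen, hrep]
      -- the characters read are cs[m] and cs[m-1]
      have hc1 : PySem.List.pyGetD cs ((m : Int)) ' ' = cs.getD m ' ' := PySem.List.pyGetD_natCast cs m ' '
      have hc2 : PySem.List.pyGetD cs ((m : Int) - 1) ' ' = cs.getD (m - 1) ' ' := by
        rw [hmm]; exact PySem.List.pyGetD_natCast cs (m - 1) ' '
      have hstepcanon : (pvCanon cs).getD m 0
          = (pvCanon cs).getD (m - 1) 0 + (if cs.getD m ' ' ≠ cs.getD (m - 1) ' ' then 1 else 0) := by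
        have h3 := pvCanon_getD_step cs (m - 1) (by omega)
        have hm1' : m - 1 + 1 = m := by omega
        rw [hm1'] at h3
        exact h3
      have htake : (pvCanon cs).take (m + 1) = (pvCanon cs).take m ++ [(pvCanon cs).getD m 0] := by
        rw [List.take_add_one]
        congr 1
        rw [List.getElem?_eq_getElem hcanlen]
        simp [List.getD_eq_getElem?_getD, List.getElem?_eq_getElem hcanlen]
      unfold pvStepA
      rw [hc1, hc2, hread]
      by_cases hne : cs.getD m ' ' ≠ cs.getD (m - 1) ' '
      · rw [if_pos hne, hset, htake, hstepcanon, if_pos hne]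
        simp
      · rw [if_neg hne, hset, htake, hstepcanon, if_neg hne]
        simp
    · -- m = 0, so m+1 = 1: empty range, initial state
      have hm0 : m = 0 := by omega
      subst hm0
      have h0 : PySem.List.pyRange 1 ((0 + 1 : Nat) : Int) 1 = [] :=
        PySem.List.pyRange_one_eq_nil (by norm_num)
      rw [h0]
      cases cs with
      | nil => simp at hm1
      | cons c t =>
        simp only [List.foldl_nil, pvCanon]
        rw [show (c :: t).length = t.length + 1 from rfl, List.replicate_succ]
        simp

theorem pvA_eq_canon (word : String) : feedback_num word = pvCanon word.toList := by
  have hdef : feedback_num word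
      = (PySem.List.pyRange 1 ((word.toList.length : Nat) : Int) 1).foldl (pvStepA word.toList)
          (List.replicate word.toList.length 0) := rfl
  rw [hdef]
  generalize word.toList = cs
  cases cs with
  | nil =>
    have h : PySem.List.pyRange 1 ((([] : List Char).length : Nat) : Int) 1 = [] :=
      PySem.List.pyRange_one_eq_nil (by simp)
    rw [h]
    rfl
  | cons c t =>
    have hlen : 1 ≤ (c :: t).length := by simp
    rw [pvA_inv (c :: t) (c :: t).length hlen le_rfl, Nat.sub_self]
    rw [List.take_of_length_le (by simp [pvCanon_length])]
    simp

-- B-side: a run of characters equal to the previous one keeps the count constant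
theorem pvChg_run (t : List Char) : ∀ (c : Char) (k : Int) (rest : List Char), (∀ x ∈ t, x = c) →
    pvChg c k (t ++ rest) = List.replicate t.length k ++ pvChg c k rest := by
  induction t with
  | nil => intro c k rest _; rfl
  | cons x t' ih =>
    intro c k rest hall
    have hx : x = c := hall x (by simp)
    subst hx
    simp only [List.cons_append, pvChg, ne_eq, not_true_eq_false, if_false]
    simp only [List.length_cons, List.replicate_succ, List.cons_append]
    rw [ih x k rest (fun y hy => hall y (by simp [hy]))]

theorem pv_dropWhile_head (p : Char → Bool) : ∀ (l : List Char) (x : Char) (u : List Char),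
    l.dropWhile p = x :: u → p x = false := by
  intro l
  induction l with
  | nil => intro x u h; simp at h
  | cons a t ih =>
    intro x u h
    by_cases hp : p a
    · rw [List.dropWhile_cons, if_pos hp] at h
      exact ih x u h
    · rw [List.dropWhile_cons, if_neg hp] at h
      cases h
      simpa using hp

theorem pvB_go_eq : ∀ (n : Nat) (cs : List Char), cs.length ≤ n → ∀ (c : Char) (k : Int),
    feedback_num_alt_go k (c :: cs) = k :: pvChg c k cs := by
  intro n
  induction n with
  | zero =>
    intro cs h c k
    have hnil : cs = [] := List.eq_nil_of_length_eq_zero (by omega)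
    subst hnil
    simp [feedback_num_alt_go, pvChg]
  | succ n ih =>
    intro cs h c k
    rw [feedback_num_alt_go]
    have hsplit : cs.takeWhile (fun x => x == c) ++ cs.dropWhile (fun x => x == c) = cs :=
      List.takeWhile_append_dropWhile
    have hall : ∀ x ∈ cs.takeWhile (fun x => x == c), x = c := by
      intro x hx
      have := List.mem_takeWhile_imp hx
      simpa using this
    cases hd : cs.dropWhile (fun x => x == c) with
    | nil =>
      rw [hd, List.append_nil] at hsplit
      have key : pvChg c k cs = List.replicate cs.length k := by
        calc pvChg c k cs = pvChg c k (cs.takeWhile (fun x => x == c) ++ []) := by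
              rw [List.append_nil, hsplit]
          _ = List.replicate (cs.takeWhile (fun x => x == c)).length k ++ pvChg c k [] :=
              pvChg_run _ c k [] hall
          _ = List.replicate cs.length k := by rw [hsplit]; simp [pvChg]
      rw [key, hsplit]
      simp [feedback_num_alt_go, List.replicate_succ]
    | cons x u =>
      have hxc : (x == c) = false := pv_dropWhile_head _ cs x u hd
      have hne : x ≠ c := by simpa using hxc
      have hlen : u.length ≤ n := by
        have h1 : (cs.takeWhile (fun x => x == c)).length
            + (cs.dropWhile (fun x => x == c)).length = cs.length := by
          rw [← List.length_append, hsplit]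
        rw [hd] at h1
        simp at h1
        omega
      have key : pvChg c k cs
          = List.replicate (cs.takeWhile (fun x => x == c)).length k
              ++ ((k + 1) :: pvChg x (k + 1) u) := by
        conv_lhs => rw [← hsplit, hd]
        rw [pvChg_run _ c k (x :: u) hall]
        congr 1
        simp [pvChg, hne]
      rw [ih u hlen x (k + 1), key]
      simp [List.replicate_succ]

theorem pvB_eq_canon (word : String) : feedback_num_alt word = pvCanon word.toList := by
  unfold feedback_num_alt
  cases hcs : word.toList with
  | nil => simp [feedback_num_alt_go, pvCanon]
  | cons c t =>
    rw [pvB_go_eq t.length t le_rfl c 0]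
    rfl

-- ===== VERDICT (by name: the statement is the Claim_ definition above) =====
theorem feedback_num_spec : Claim_equal_feedback_num := by
  intro word _
  unfold Spec_feedback_num
  rw [pvA_eq_canon, pvB_eq_canon]
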